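-- pv_equiv track=rewrite | github.com/Dev-ERAK/PythonPraticeCode | Daily Classes/2022.04.11/Interesting Array.py | solve
-- ===== SOURCE A (Python) =====
-- def solve(A):
--     N = len(A)
--     oddCounter = 0
--     for i in range(N):
--         if A[i] & 1 != 0:
--             oddCounter += 1
--
--     ans = "No" if oddCounter & 1 != 0 else "Yes"
--     return ans
-- ===== SOURCE B (Python) =====
-- def solve(A):
--     # Parity of the number of odd elements equals the parity of the total sum.
--     return "Yes" if sum(A) & 1 == 0 else "No"
-- ===== Notes on version B (the rewrite author's own statement) =====
-- stated objective: simpler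
-- what changed: Replaces the per-element odd-counting loop with a single sum(A) and a parity test on the total, using that the parity of the odd-count equals the parity of the sum.
import Mathlib
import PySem

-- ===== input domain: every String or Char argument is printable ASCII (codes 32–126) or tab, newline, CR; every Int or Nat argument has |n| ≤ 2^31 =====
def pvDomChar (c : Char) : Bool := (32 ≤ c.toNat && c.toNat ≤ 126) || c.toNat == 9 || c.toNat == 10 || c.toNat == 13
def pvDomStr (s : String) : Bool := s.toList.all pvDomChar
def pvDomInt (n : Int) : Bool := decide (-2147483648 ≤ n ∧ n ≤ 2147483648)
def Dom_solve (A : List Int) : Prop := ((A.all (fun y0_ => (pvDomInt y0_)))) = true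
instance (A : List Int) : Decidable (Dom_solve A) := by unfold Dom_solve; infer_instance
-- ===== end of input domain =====

-- B: instead of counting odd elements, sums the whole list and tests the sum's parity (simpler).

-- ===== PORT A =====
def solve (A : List Int) : String :=
  let N : Int := A.length
  let oddCounter : Int :=
    (PySem.List.pyRange 0 N 1).foldl
      (fun acc i => if PySem.Int.band (PySem.List.pyGetD A i 0) 1 ≠ 0 then acc + 1 else acc) 0
  if PySem.Int.band oddCounter 1 ≠ 0 then "No" else "Yes"

-- ===== PORT B =====
def solve_alt (A : List Int) : String :=
  if PySem.Int.band A.sum 1 = 0 then "Yes" else "No"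

-- ===== PRECONDITION & SPEC =====
def Spec_solve (A : List Int) (out : String) : Prop := out = solve_alt A
instance (A : List Int) (out : String) : Decidable (Spec_solve A out) := by unfold Spec_solve; infer_instance

-- ===== CLAIM (what is proved, stated in full; the proofs are below) =====
def Claim_equal_solve : Prop := ∀ (A : List Int), Dom_solve A → Spec_solve A (solve A)

-- ===== LEMMAS AND PROOFS =====

-- parity invariant: the odd-count accumulator agrees mod 2 with c + sum of the elements
theorem pv_count_mod_two (A : List Int) (c : Int) :
    (A.foldl (fun acc x => if PySem.Int.band x 1 ≠ 0 then acc + 1 else acc) c) % 2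
      = (c + A.sum) % 2 := by
  induction A generalizing c with
  | nil => simp
  | cons x xs ih =>
    simp only [List.foldl_cons, List.sum_cons, ih]
    rw [PySem.Int.band_one, PySem.Int.mod_eq_emod_of_pos (by omega)]
    split_ifs with h <;> omega

-- ===== VERDICT (by name: the statement is the Claim_ definition above) =====
theorem solve_spec : Claim_equal_solve := by
  intro A _
  unfold Spec_solve solve solve_alt
  show (if PySem.Int.band ((PySem.List.pyRange 0 (A.length : Int) 1).foldl
      (fun acc i => if PySem.Int.band (PySem.List.pyGetD A i 0) 1 ≠ 0 then acc + 1 else acc) 0) 1 ≠ 0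
    then "No" else "Yes") = _
  rw [PySem.List.foldl_pyRange_zero_pyGetD' A 0
      (fun acc x => if PySem.Int.band x 1 ≠ 0 then acc + 1 else acc) 0]
  have h := pv_count_mod_two A 0
  rw [PySem.Int.band_one, PySem.Int.band_one,
      PySem.Int.mod_eq_emod_of_pos (b := 2) (by omega),
      PySem.Int.mod_eq_emod_of_pos (b := 2) (by omega), h]
  simp only [zero_add]
  split_ifs with h1 h2 <;> simp_all
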